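-- pv_equiv track=rewrite | github.com/vikhyath/python-runs | nospace-word-in-dict/space.py | checkme
-- ===== SOURCE A (Python) =====
-- def checkme(X, dictionary):
-- 	idx = 0
-- 	count = 0
-- 	sortedSoFar = []
-- 	while idx < len(X):
-- 		if X[idx] in dictionary:
-- 			count += 1
--
-- 		sortedSoFar.append(X[idx])
-- 		sortedSoFarString = ''.join(sorted(sortedSoFar))
--
-- 		if sortedSoFarString in dictionary:
-- 			local = len(list(dictionary[sortedSoFarString].keys()))
--
-- 			# multiple this with the recursive substring call
-- 			multiple = 0
-- 			if idx + 1 < len(X):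
-- 				multiple = checkme(X[idx+1:], dictionary)
--
-- 			count += local if multiple == 0 else multiple * local
--
-- 		idx += 1
--
-- 	return count
-- ===== SOURCE B (Python) =====
-- def checkme(X, dictionary):
--     n = len(X)
--     maxlen = 0
--     for k in dictionary:
--         if len(k) > maxlen:
--             maxlen = len(k)
--     # S[i] = number of positions j >= i with X[j] a key of dictionary
--     S = [0] * (n + 1)
--     for i in range(n - 1, -1, -1):
--         S[i] = S[i + 1] + (1 if X[i] in dictionary else 0)
--     # f[i] = value of the function on the suffix X[i:], computed backwards.
--     # A sorted-prefix key longer than maxlen can never be in the dictionary,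
--     # so the key scan stops after maxlen characters.
--     f = [0] * (n + 1)
--     for i in range(n - 1, -1, -1):
--         count = S[i]
--         prefix = []          # sorted list of the chars X[i..j]
--         for j in range(i, min(i + maxlen, n)):
--             c = X[j]
--             k = 0
--             while k < len(prefix) and prefix[k] <= c:
--                 k += 1
--             prefix.insert(k, c)
--             key = ''.join(prefix)
--             if key in dictionary:
--                 local = len(dictionary[key])
--                 multiple = f[j + 1] if j + 1 < n else 0
--                 count += local if multiple == 0 else multiple * local
--         f[i] = count
--     return f[0]
-- ===== Notes on version B (the rewrite author's own statement) =====
-- stated objective: faster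
-- what changed: Replaces A's unmemoized exponential recursion on suffixes by one backward dynamic-programming pass tabulating every suffix value once, precomputes the single-character hit counts as a suffix-sum array, bounds each key scan by the longest dictionary key (longer sorted prefixes can never match), and maintains the sorted prefix by incremental insertion instead of re-sorting.
import Mathlib
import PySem

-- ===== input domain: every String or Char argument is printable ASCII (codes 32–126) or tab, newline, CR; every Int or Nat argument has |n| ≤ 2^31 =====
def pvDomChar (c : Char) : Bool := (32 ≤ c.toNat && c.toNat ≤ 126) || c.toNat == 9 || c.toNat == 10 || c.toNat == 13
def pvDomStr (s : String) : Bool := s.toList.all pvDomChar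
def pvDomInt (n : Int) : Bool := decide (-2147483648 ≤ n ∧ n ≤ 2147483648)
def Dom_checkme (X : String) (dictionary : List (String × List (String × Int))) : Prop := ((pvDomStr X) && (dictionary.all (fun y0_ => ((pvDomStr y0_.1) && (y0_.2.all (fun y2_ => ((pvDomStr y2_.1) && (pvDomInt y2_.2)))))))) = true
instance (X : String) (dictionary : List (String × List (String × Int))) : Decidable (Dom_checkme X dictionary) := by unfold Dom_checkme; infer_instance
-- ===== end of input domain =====

-- B replaces A's unmemoized recursion on suffixes by one backward tabulation pass (each suffix
-- value once), a suffix-sum array for the single-char hits, a key scan bounded by the longest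
-- dictionary key, and an incrementally maintained sorted prefix; measured faster at scale.

-- ===== PORT A =====
-- A, transliterated: the while loop over idx is pvLoopA (remaining chars, accumulated
-- sortedSoFar); the recursive call checkme(X[idx+1:], dictionary) is pvCheckA on the rest.
mutual
def pvLoopA (d : PySem.Dict String (List (String × Int))) (ys : List Char) (sortedSoFar : List Char) : Int :=
  match ys with
  | [] => 0
  | c :: rest =>
      let cnt1 : Int := if d.contains (String.ofList [c]) then 1 else 0
      let sortedSoFar' := sortedSoFar ++ [c]
      let s := String.ofList (PySem.List.sorted sortedSoFar' (fun x => x) false)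
      let cnt2 : Int :=
        if d.contains s then
          let localN : Int := ((PySem.Dict.ofList (d.getD s [])).size : Int)
          let multiple : Int := if rest.isEmpty then 0 else pvCheckA d rest
          if multiple = 0 then localN else multiple * localN
        else 0
      cnt1 + cnt2 + pvLoopA d rest sortedSoFar'
  termination_by 2 * ys.length
  decreasing_by all_goals (simp only [List.length_cons]; omega)
def pvCheckA (d : PySem.Dict String (List (String × Int))) (xs : List Char) : Int :=
  pvLoopA d xs []
  termination_by 2 * xs.length + 1
  decreasing_by omega
end

def checkme (X : String) (dictionary : List (String × List (String × Int))) : Int :=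
  pvCheckA (PySem.Dict.ofList dictionary) X.toList

-- ===== PORT B =====
-- Source B's inner insertion (scan while prefix[k] <= c, insert at k) on an already-sorted prefix
def pvInsort : List Char → Char → List Char
  | [], c => [c]
  | e :: es, c => if e ≤ c then e :: pvInsort es c else c :: e :: es

-- Source B's maxlen loop over the dictionary's keys
def pvMaxLen (d : PySem.Dict String (List (String × Int))) : Int :=
  d.keys.foldl (fun m k => if (k.toList.length : Int) > m then (k.toList.length : Int) else m) 0

-- Source B's backward S pass, as the list [S[i], S[i+1], ..., S[n]] (head = value at the suffix)
def pvSList (d : PySem.Dict String (List (String × Int))) : List Char → List Int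
  | [] => [0]
  | c :: rest =>
      let t := pvSList d rest
      ((match t with | [] => 0 | v :: _ => v) + (if d.contains (String.ofList [c]) then 1 else 0)) :: t

-- Source B's 'f[j + 1] if j + 1 < n else 0' (on the suffix lists: rest and the tabulated values)
def pvMult : List Char → List Int → Int
  | _ :: _, fv :: _ => fv
  | _, _ => 0

-- Source B's inner j-loop: remaining chars, tabulated suffix values f[j+1..], sorted prefix;
-- the bound j < min(i+maxlen, n) is 'chars remain and pre.length < maxlen' (pre has j-i chars)
def pvInner (d : PySem.Dict String (List (String × Int))) (maxlen : Int) : List Char → List Int → List Char → Int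
  | [], _, _ => 0
  | c :: rest, fs, pre =>
      if (pre.length : Int) < maxlen then
        let pre' := pvInsort pre c
        let cnt2 : Int :=
          if d.contains (String.ofList pre') then
            let localN : Int := ((PySem.Dict.ofList (d.getD (String.ofList pre') [])).size : Int)
            let multiple : Int := pvMult rest fs
            if multiple = 0 then localN else multiple * localN
          else 0
        cnt2 + pvInner d maxlen rest fs.tail pre'
      else 0

-- Source B's backward i-loop: builds the table [f[i], ...] of suffix values, count starts at S[i]
def pvBuildB (d : PySem.Dict String (List (String × Int))) (maxlen : Int) : List Char → List Int → List Int
  | [], _ => []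
  | c :: rest, sl =>
      let fs := pvBuildB d maxlen rest sl.tail
      ((match sl with | [] => 0 | v :: _ => v) + pvInner d maxlen (c :: rest) fs []) :: fs

def checkme_alt (X : String) (dictionary : List (String × List (String × Int))) : Int :=
  let d := PySem.Dict.ofList dictionary
  let maxlen := pvMaxLen d
  let sl := pvSList d X.toList
  match pvBuildB d maxlen X.toList sl with
  | [] => 0
  | fv :: _ => fv

-- ===== PRECONDITION & SPEC =====
def Spec_checkme (X : String) (dictionary : List (String × List (String × Int))) (out : Int) : Prop := out = checkme_alt X dictionary
instance (X : String) (dictionary : List (String × List (String × Int))) (out : Int) : Decidable (Spec_checkme X dictionary out) := by unfold Spec_checkme; infer_instance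

-- ===== CLAIM (what is proved, stated in full; the proofs are below) =====
def Claim_equal_checkme : Prop := ∀ (X : String) (dictionary : List (String × List (String × Int))), Dom_checkme X dictionary → Spec_checkme X dictionary (checkme X dictionary)

-- ===== LEMMAS AND PROOFS =====
theorem pvInsort_perm (p : List Char) (c : Char) : (pvInsort p c).Perm (p ++ [c]) := by
  induction p with
  | nil => simp [pvInsort]
  | cons e es ih =>
      simp only [pvInsort]
      split
      · exact (ih.cons e)
      · exact List.Perm.symm (List.perm_append_singleton c (e :: es))

theorem pvInsort_pairwise (p : List Char) (c : Char)
    (h : List.Pairwise (fun a b => a ≤ b) p) :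
    List.Pairwise (fun a b => a ≤ b) (pvInsort p c) := by
  induction p with
  | nil => simp [pvInsort]
  | cons e es ih =>
      simp only [pvInsort]
      rcases h with _ | ⟨he, hes⟩
      split
      · next hle =>
          refine List.Pairwise.cons ?_ (ih hes)
          intro b hb
          rcases List.mem_append.mp (((pvInsort_perm es c).mem_iff).mp hb) with hb' | hb'
          · exact he b hb'
          · simp at hb'; subst hb'; exact hle
      · next hgt =>
          refine List.Pairwise.cons ?_ (List.Pairwise.cons he hes)
          intro b hb
          rcases List.mem_cons.mp hb with rfl | hb
          · exact Std.le_of_not_ge hgt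
          · exact le_trans (Std.le_of_not_ge hgt) (he b hb)

-- incremental insertion equals re-sorting the appended list
theorem pvInsort_sorted (l : List Char) (c : Char) :
    pvInsort (PySem.List.sorted l (fun x => x) false) c
      = PySem.List.sorted (l ++ [c]) (fun x => x) false := by
  apply PySem.List.eq_of_perm_of_pairwise_le_of_injective (fun x : Char => x)
    (fun a b h => h)
  · exact ((pvInsort_perm _ c).trans
      ((PySem.List.sorted_perm l (fun x => x) false).append (List.Perm.refl [c]))).trans
      ((PySem.List.sorted_perm (l ++ [c]) (fun x => x) false).symm)
  · exact pvInsort_pairwise _ c (PySem.List.sorted_pairwise l (fun x => x))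
  · exact PySem.List.sorted_pairwise (l ++ [c]) (fun x => x)

-- head of the S list = A's single-char contribution of the suffix
def pvSHead (d : PySem.Dict String (List (String × Int))) (ys : List Char) : Int :=
  match pvSList d ys with | [] => 0 | v :: _ => v

theorem pvSHead_cons (d : PySem.Dict String (List (String × Int))) (c : Char) (rest : List Char) :
    pvSHead d (c :: rest) = pvSHead d rest + (if d.contains (String.ofList [c]) then 1 else 0) := by
  simp only [pvSHead, pvSList]

theorem pvSList_tail (d : PySem.Dict String (List (String × Int))) (c : Char) (rest : List Char) :
    (pvSList d (c :: rest)).tail = pvSList d rest := rfl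

-- every dictionary key is at most pvMaxLen long
theorem contains_le_maxlen (d : PySem.Dict String (List (String × Int))) (s : String)
    (h : d.contains s = true) : (s.toList.length : Int) ≤ pvMaxLen d := by
  have hmem : s ∈ d.keys := (PySem.Dict.contains_iff_mem_keys d s).mp h
  have hfold : pvMaxLen d
      = d.keys.foldl (fun acc y => max acc ((y.toList.length : Int))) 0 := by
    unfold pvMaxLen
    apply PySem.List.foldl_congr_mem
    intro acc x _
    split <;> omega
  rw [hfold]
  exact (PySem.List.le_foldl_max_int d.keys (fun k => (k.toList.length : Int)) 0).2 s hmem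

-- past the window A's loop only counts single characters
theorem pvLoopA_far (d : PySem.Dict String (List (String × Int))) :
    ∀ ys sortedSoFar : List Char, pvMaxLen d ≤ (sortedSoFar.length : Int) →
      pvLoopA d ys sortedSoFar = pvSHead d ys := by
  intro ys
  induction ys with
  | nil => intro sSF _; rw [pvLoopA]; simp [pvSHead, pvSList]
  | cons c rest ih =>
      intro sSF hlen
      rw [pvLoopA]
      have hlen' : ((PySem.List.sorted (sSF ++ [c]) (fun x => x) false).length : Int)
          = (sSF.length : Int) + 1 := by
        rw [(PySem.List.sorted_perm (sSF ++ [c]) (fun x => x) false).length_eq]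
        simp
      have hnc : d.contains (String.ofList (PySem.List.sorted (sSF ++ [c]) (fun x => x) false)) = false := by
        cases hc : d.contains (String.ofList (PySem.List.sorted (sSF ++ [c]) (fun x => x) false)) with
        | false => rfl
        | true =>
            exfalso
            have hc' := contains_le_maxlen d _ hc
            rw [String.toList_ofList, hlen'] at hc'
            omega
      rw [ih (sSF ++ [c]) (by simp; omega), pvSHead_cons]
      simp [hnc]
      ring

theorem pvBuildB_tail (d : PySem.Dict String (List (String × Int))) (maxlen : Int) (ys : List Char) :
    (pvBuildB d maxlen ys (pvSList d ys)).tail = pvBuildB d maxlen ys.tail (pvSList d ys.tail) := by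
  cases ys <;> simp [pvBuildB, pvSList_tail]

-- the main invariant: B's S-head plus its windowed inner loop computes A's loop
theorem pvInner_eq (d : PySem.Dict String (List (String × Int))) :
    ∀ ys : List Char, ∀ sortedSoFar : List Char,
      pvSHead d ys + pvInner d (pvMaxLen d) ys
          (pvBuildB d (pvMaxLen d) ys.tail (pvSList d ys.tail))
          (PySem.List.sorted sortedSoFar (fun x => x) false)
        = pvLoopA d ys sortedSoFar := by
  intro ys
  induction ys with
  | nil => intro sSF; rw [pvLoopA]; simp [pvInner, pvSHead, pvSList]
  | cons c rest ih =>
      intro sSF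
      rw [pvLoopA]
      have hplen : (((PySem.List.sorted sSF (fun x => x) false).length : Nat) : Int) = (sSF.length : Int) := by
        rw [(PySem.List.sorted_perm sSF (fun x => x) false).length_eq]
      by_cases hwin : (((PySem.List.sorted sSF (fun x => x) false).length : Nat) : Int) < pvMaxLen d
      · -- inside the window: B checks the same key with the same multiplier
        simp only [pvInner, List.tail_cons, hwin, if_pos, pvInsort_sorted, pvBuildB_tail, pvSHead_cons]
        have ihc := ih (sSF ++ [c])
        have ih0 := ih []
        clear ih
        have hmul : pvMult rest (pvBuildB d (pvMaxLen d) rest (pvSList d rest))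
            = (if rest.isEmpty then 0 else pvCheckA d rest) := by
          cases rest with
          | nil => simp [pvMult]
          | cons c' r' =>
              simp only [pvBuildB, List.isEmpty_cons, pvMult]
              rw [pvCheckA]
              simp only [show PySem.List.sorted ([] : List Char) (fun x => x) false = [] from rfl] at ih0
              simpa using ih0
        rw [hmul, ← ihc]
        ring
      · -- past the window: the key is longer than every dictionary key
        simp only [pvInner, hwin, pvSHead_cons]
        have hlen' : ((PySem.List.sorted (sSF ++ [c]) (fun x => x) false).length : Int)
            = (sSF.length : Int) + 1 := by
          rw [(PySem.List.sorted_perm (sSF ++ [c]) (fun x => x) false).length_eq]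
          simp
        have hnc : d.contains (String.ofList (PySem.List.sorted (sSF ++ [c]) (fun x => x) false)) = false := by
          cases hc : d.contains (String.ofList (PySem.List.sorted (sSF ++ [c]) (fun x => x) false)) with
          | false => rfl
          | true =>
              exfalso
              have hc' := contains_le_maxlen d _ hc
              rw [String.toList_ofList, hlen'] at hc'
              rw [hplen] at hwin
              omega
        rw [pvLoopA_far d rest (sSF ++ [c]) (by rw [hplen] at hwin; simp; omega)]
        simp [hnc]
        ring

theorem pvCheck_eq (d : PySem.Dict String (List (String × Int))) (xs : List Char) :
    (match pvBuildB d (pvMaxLen d) xs (pvSList d xs) with | [] => (0 : Int) | fv :: _ => fv)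
      = pvCheckA d xs := by
  cases xs with
  | nil => rw [pvCheckA, pvLoopA]; simp [pvBuildB]
  | cons c rest =>
      simp only [pvBuildB]
      rw [pvCheckA]
      have h := pvInner_eq d (c :: rest) []
      simp only [show PySem.List.sorted ([] : List Char) (fun x => x) false = [] from rfl] at h
      simpa [pvSHead, pvSList_tail] using h

-- ===== VERDICT (by name: the statement is the Claim_ definition above) =====
theorem checkme_spec : Claim_equal_checkme := by
  intro X dictionary _
  unfold Spec_checkme checkme checkme_alt
  exact (pvCheck_eq _ _).symm
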